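-- pv_equiv track=rewrite | github.com/ViacheslavBoltukhov/- | 2023/Тренировочная работа №4/Вариант 1/27B.py | d5
-- ===== SOURCE A (Python) =====
-- def d5(n):
--     k=0
--     while n%5==0:
--         k+=1
--         n//=5
--         if k>7:
--             return 8
--     return k
-- ===== SOURCE B (Python) =====
-- def d5(n):
--     for k in range(1, 9):
--         if n % 5**k != 0:
--             return k - 1
--     return 8
-- ===== Notes on version B (the rewrite author's own statement) =====
-- stated objective: alternative
-- what changed: Instead of repeatedly floor-dividing a mutable n by five while counting, B leaves n untouched and tests divisibility by successively larger powers of five, returning one less than the first exponent whose power fails to divide n, or the cap if all eight tests pass.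
import Mathlib
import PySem

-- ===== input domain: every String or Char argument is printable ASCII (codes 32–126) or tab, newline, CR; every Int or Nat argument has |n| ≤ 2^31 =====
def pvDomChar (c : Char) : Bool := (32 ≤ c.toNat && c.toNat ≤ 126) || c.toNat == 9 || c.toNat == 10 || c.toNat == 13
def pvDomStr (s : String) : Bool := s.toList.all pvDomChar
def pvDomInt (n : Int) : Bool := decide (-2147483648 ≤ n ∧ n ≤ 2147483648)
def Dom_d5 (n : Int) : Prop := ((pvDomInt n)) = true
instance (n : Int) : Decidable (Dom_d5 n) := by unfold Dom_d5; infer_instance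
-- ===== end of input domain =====

-- B keeps n fixed and tests divisibility by increasing powers of 5 instead of A's repeated floor division of a mutable n; objective: alternative decomposition.

-- ===== PORT A =====
-- A's while loop runs at most 8 times (the k>7 check returns 8), so fuel 8 is exact.
def d5Go : Nat → Int → Int → Int
  | 0, k, _ => k
  | fuel + 1, k, n =>
    if PySem.Int.mod n 5 = 0 then
      let k' := k + 1
      let n' := PySem.Int.floordiv n 5
      if k' > 7 then 8 else d5Go fuel k' n'
    else k

def d5 (n : Int) : Int := d5Go 8 0 n

-- ===== PORT B =====
def d5AltGo (n : Int) : Nat → Int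
  | k =>
    if h : k ≤ 8 then
      if PySem.Int.mod n (5 ^ k) ≠ 0 then (k : Int) - 1
      else d5AltGo n (k + 1)
    else 8
  termination_by k => 9 - k

def d5_alt (n : Int) : Int := d5AltGo n 1

-- ===== PRECONDITION & SPEC =====
def Spec_d5 (n : Int) (out : Int) : Prop := out = d5_alt n
instance (n : Int) (out : Int) : Decidable (Spec_d5 n out) := by unfold Spec_d5; infer_instance

-- ===== CLAIM (what is proved, stated in full; the proofs are below) =====
def Claim_equal_d5 : Prop := ∀ (n : Int), Dom_d5 n → Spec_d5 n (d5 n)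

-- ===== LEMMAS AND PROOFS =====

theorem alt_step (n : Int) (k : Nat) :
    d5AltGo n k = if k ≤ 8 then (if ¬((5:Int) ^ k ∣ n) then (k : Int) - 1 else d5AltGo n (k + 1)) else 8 := by
  rw [d5AltGo]
  simp only [dite_eq_ite, ne_eq, PySem.Int.mod_eq_zero_iff_dvd]

theorem pow5_dvd_iff (j : Nat) (m : Int) : (5:Int) ^ (j + 1) ∣ 5 ^ j * m ↔ (5:Int) ∣ m := by
  rw [pow_succ]
  exact mul_dvd_mul_iff_left (pow_ne_zero j (by norm_num : (5:Int) ≠ 0))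

theorem goEq (f : Nat) : f ≤ 8 → ∀ (n m : Int), n = 5 ^ (8 - f) * m →
    d5Go f ((8 - f : Nat) : Int) m = d5AltGo n ((8 - f) + 1) := by
  induction f with
  | zero =>
    intro _ n m _
    rw [alt_step]
    norm_num [d5Go]
  | succ f ih =>
    intro hf n m hn
    have hj1 : 8 - (f + 1) + 1 = 8 - f := by omega
    rw [alt_step]
    simp only [d5Go]
    by_cases h5 : PySem.Int.mod m 5 = 0
    · have h5d : (5:Int) ∣ m := (PySem.Int.mod_eq_zero_iff_dvd m 5).mp h5
      have hdvd : (5:Int) ^ (8 - (f + 1) + 1) ∣ n := by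
        rw [hn]; exact (pow5_dvd_iff _ m).mpr h5d
      rw [if_pos h5]
      by_cases hf0 : f = 0
      · subst hf0
        have hd : (390625:Int) ∣ n := by have h := hdvd; norm_num at h; exact h
        norm_num
        rw [if_pos hd, alt_step]
        norm_num
      · have hk' : ¬(((8 - (f + 1) : Nat) : Int) + 1 > 7) := by omega
        rw [if_neg hk']
        have hdiv : PySem.Int.floordiv m 5 = m / 5 :=
          PySem.Int.floordiv_eq_ediv_of_pos (by norm_num)
        have hcast : ((8 - (f + 1) : Nat) : Int) + 1 = ((8 - f : Nat) : Int) := by omega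
        rw [hdiv, hcast]
        have hn' : n = 5 ^ (8 - f) * (m / 5) := by
          calc n = 5 ^ (8 - (f + 1)) * m := hn
            _ = 5 ^ (8 - (f + 1)) * (5 * (m / 5)) := by rw [Int.mul_ediv_cancel' h5d]
            _ = 5 ^ (8 - f) * (m / 5) := by rw [← hj1, pow_succ]; ring
        rw [ih (by omega) n (m / 5) hn']
        rw [if_pos (by omega : 8 - (f + 1) + 1 ≤ 8), if_neg (not_not_intro hdvd), hj1]
    · rw [if_neg h5]
      have hnd : ¬((5:Int) ^ (8 - (f + 1) + 1) ∣ n) := by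
        rw [hn, pow5_dvd_iff]
        exact fun hd => h5 ((PySem.Int.mod_eq_zero_iff_dvd m 5).mpr hd)
      rw [if_pos (by omega : 8 - (f + 1) + 1 ≤ 8), if_pos hnd]
      omega

-- ===== VERDICT (by name: the statement is the Claim_ definition above) =====
theorem d5_spec : Claim_equal_d5 := by
  intro n _
  have h := goEq 8 (le_refl 8) n n (by norm_num)
  norm_num at h
  simpa [Spec_d5, d5, d5_alt] using h
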